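-- pv_equiv track=rewrite | github.com/Saotsu/Algorithms-on-Codewars | Explosive Sum.py | exp_sum
-- ===== SOURCE A (Python) =====
-- def exp_sum(n):
--     array = [[1] + n*[0], (n+1)*[1]]
--     for x in range(n-1):
--         array.append([1 for x in range(n+1)])
--
--     for row in range(len(array)):
--         if row > 1:
--             for column in range(len(array)):
--                 if column < row:
--                     array[row][column] = array[row-1][column]
--                 else:
--                     array[row][column] = array[row-1][column]+array[row][column-row]
--
--     return array[-1][-1]
-- ===== SOURCE B (Python) =====
-- def exp_sum(n):
--     # Count partitions by NUMBER OF PARTS (the conjugate statistic): table[m][k] is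
--     # the number of partitions of m into exactly k parts, via
--     # table[m][k] = table[m-1][k-1] + table[m-k][k]; the answer is sum(table[n]).
--     table = [[1] + [0] * n]
--     for m in range(1, n + 1):
--         row = [0] * (n + 1)
--         for k in range(1, m + 1):
--             row[k] = table[m - 1][k - 1] + table[m - k][k]
--         table.append(row)
--     return sum(table[n])
-- ===== Notes on version B (the rewrite author's own statement) =====
-- stated objective: alternative
-- what changed: B counts partitions by the conjugate statistic: a table of 'partitions of m into exactly k parts' built with the recurrence table[m][k] = table[m-1][k-1] + table[m-k][k] (triangular inner loop, rows read only from earlier rows) and a final summation over the last row, instead of A's 'largest part at most row' table whose every row is rewritten in place with a copy branch.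
import Mathlib
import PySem

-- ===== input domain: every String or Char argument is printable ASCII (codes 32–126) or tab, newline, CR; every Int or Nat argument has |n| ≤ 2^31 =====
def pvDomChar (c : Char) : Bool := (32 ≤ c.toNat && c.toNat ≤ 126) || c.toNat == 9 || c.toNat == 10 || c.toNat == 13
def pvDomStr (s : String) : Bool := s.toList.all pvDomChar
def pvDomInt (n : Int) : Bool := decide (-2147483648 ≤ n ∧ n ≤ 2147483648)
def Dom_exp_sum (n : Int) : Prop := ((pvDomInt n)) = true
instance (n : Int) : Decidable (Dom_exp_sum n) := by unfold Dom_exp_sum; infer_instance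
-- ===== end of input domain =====

-- B counts partitions by the conjugate statistic (a table of partitions into exactly k
-- parts, recurrence table[m][k] = table[m-1][k-1] + table[m-k][k], answer = sum of the
-- last row) instead of A's largest-part-bounded table rewritten row by row in place;
-- alternative algorithm of the same O(n^2) cost.


-- ===== PORT A =====
-- A's inner column loop: for column in range(len(array)): overwrite array[row][column]
-- (in-place element writes are modelled by List.set on the current row `cur`)
def expRowA (prev cur : List Int) (r L : Nat) : List Int :=
  (List.range L).foldl
    (fun cur c =>
      cur.set c (if c < r then prev.getD c 0 else prev.getD c 0 + cur.getD (c - r) 0))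
    cur

def exp_sum (n : Int) : Int :=
  -- array = [[1] + n*[0], (n+1)*[1]]
  let arr0 : List (List Int) := [1 :: List.replicate n.toNat 0, List.replicate (n + 1).toNat 1]
  -- for x in range(n-1): array.append([1 for x in range(n+1)])
  let arr1 := (List.range (n - 1).toNat).foldl
    (fun a _ => a ++ [(List.range (n + 1).toNat).map (fun _ => (1 : Int))]) arr0
  -- for row in range(len(array)): if row > 1: (inner column loop)
  let arr := (List.range arr1.length).foldl
    (fun a row =>
      if row > 1 then a.set row (expRowA (a.getD (row - 1) []) (a.getD row []) row a.length)
      else a) arr1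
  -- return array[-1][-1]
  PySem.List.pyGetD (PySem.List.pyGetD arr (-1) []) (-1) 0

-- ===== PORT B =====
def exp_sum_alt (n : Int) : Int :=
  -- table = [[1] + [0] * n]
  let table0 : List (List Int) := [1 :: List.replicate n.toNat 0]
  -- for m in range(1, n+1): build row m (for k in range(1, m+1): row[k] = ...), append it
  let table := (List.range' 1 n.toNat).foldl
    (fun t m =>
      t ++ [(List.range' 1 m).foldl
        (fun row k =>
          row.set k ((t.getD (m - 1) []).getD (k - 1) 0 + (t.getD (m - k) []).getD k 0))
        (List.replicate (n.toNat + 1) 0)])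
    table0
  -- return sum(table[n])
  (PySem.List.pyGetD table n []).sum

-- ===== PRECONDITION & SPEC =====
-- Pre_ excludes negative n, on which A raises IndexError (array[-1] of an empty last row).
def Pre_exp_sum (n : Int) : Prop := 0 ≤ n
instance (n : Int) : Decidable (Pre_exp_sum n) := by unfold Pre_exp_sum; infer_instance
def pvWitness_exp_sum : Int := 5

def Spec_exp_sum (n : Int) (out : Int) : Prop := out = exp_sum_alt n
instance (n : Int) (out : Int) : Decidable (Spec_exp_sum n out) := by unfold Spec_exp_sum; infer_instance

-- ===== CLAIM (what is proved, stated in full; the proofs are below) =====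
def Claim_equal_exp_sum : Prop := ∀ (n : Int), Dom_exp_sum n → Pre_exp_sum n → Spec_exp_sum n (exp_sum n)

-- ===== LEMMAS AND PROOFS =====

-- P c r = number of partitions of c into parts of size ≤ r (the spec of A's table)
def P : Nat → Nat → Int
  | c, 0 => if c = 0 then 1 else 0
  | c, (r + 1) => P c r + if r + 1 ≤ c then P (c - (r + 1)) (r + 1) else 0
termination_by c r => (c, r)
decreasing_by
  · exact Prod.Lex.right c (Nat.lt_succ_self r)
  · exact Prod.Lex.left _ _ (by omega)

theorem P_succ_lt {c r : Nat} (h : c < r + 1) : P c (r + 1) = P c r := by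
  rw [P]; simp [Nat.not_le.mpr h]

theorem P_succ_le {c r : Nat} (h : r + 1 ≤ c) : P c (r + 1) = P c r + P (c - (r + 1)) (r + 1) := by
  rw [P]; simp [h]

theorem P_zero (c : Nat) : P c 0 = if c = 0 then 1 else 0 := by
  rw [P]

theorem P_one (c : Nat) : P c 1 = 1 := by
  induction c with
  | zero =>
      show P 0 (0 + 1) = 1
      rw [P_succ_lt (by omega), P_zero]
      simp
  | succ c ih =>
      show P (c + 1) (0 + 1) = 1
      rw [P_succ_le (by omega), P_zero]
      simpa using ih

-- Q m k = number of partitions of m into EXACTLY k parts (the spec of B's table)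
def Q : Nat → Nat → Int
  | 0, 0 => 1
  | 0, _ + 1 => 0
  | _ + 1, 0 => 0
  | m + 1, k + 1 => if k + 1 ≤ m + 1 then Q m k + Q (m - k) (k + 1) else 0
termination_by m k => (m, k)
decreasing_by
  · exact Prod.Lex.left _ _ (by omega)
  · exact Prod.Lex.left _ _ (by omega)

theorem Q_succ_succ_le {m k : Nat} (h : k ≤ m) :
    Q (m + 1) (k + 1) = Q m k + Q (m - k) (k + 1) := by
  rw [Q]; simp [Nat.succ_le_succ h]

theorem Q_gt {n k : Nat} (h : n < k) : Q n k = 0 := by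
  match n, k with
  | 0, k + 1 => rw [Q]
  | m + 1, k + 1 =>
      rw [Q]
      simp [show ¬ (k + 1 ≤ m + 1) by omega]

theorem Q_zero (n : Nat) : Q n 0 = if n = 0 then 1 else 0 := by
  match n with
  | 0 => rw [Q]; simp
  | m + 1 => rw [Q]; simp

-- S n k = partitions of n into at most k parts (partial row sums of Q)
def S (n k : Nat) : Int := ∑ j ∈ Finset.range (k + 1), Q n j

theorem S_zero (n : Nat) : S n 0 = Q n 0 := by
  unfold S; simp

theorem S_succ (n k : Nat) : S n (k + 1) = S n k + Q n (k + 1) := by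
  unfold S; rw [Finset.sum_range_succ]

-- deleting the first column: exactly k parts of n ↔ at most k parts of n - k
theorem Q_eq_S : ∀ n k, 1 ≤ k → k ≤ n → Q n k = S (n - k) k := by
  intro n
  induction n using Nat.strong_induction_on with
  | _ n ih =>
    intro k h1 h2
    obtain ⟨m, rfl⟩ : ∃ m, n = m + 1 := ⟨n - 1, by omega⟩
    obtain ⟨j, rfl⟩ : ∃ j, k = j + 1 := ⟨k - 1, by omega⟩
    rw [Q_succ_succ_le (by omega), show m + 1 - (j + 1) = m - j by omega, S_succ]
    congr 1
    rcases Nat.eq_zero_or_pos j with hj | hj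
    · subst hj; rw [S_zero]; simp
    · rw [ih m (by omega) j (by omega) (by omega)]

-- both tables count the same partitions: at most k parts = parts of size ≤ k
theorem S_eq_P : ∀ n k, S n k = P n k := by
  intro n
  induction n using Nat.strong_induction_on with
  | _ n ih =>
    intro k
    induction k with
    | zero => rw [S_zero, P_zero, Q_zero]
    | succ k ihk =>
        rw [S_succ, ihk]
        by_cases h : k + 1 ≤ n
        · rw [P_succ_le h, Q_eq_S n (k + 1) (by omega) h, ih (n - (k + 1)) (by omega)]
        · rw [P_succ_lt (by omega), Q_gt (by omega)]
          ring

theorem getD_set_self {α : Type} {l : List α} {i : Nat} (v d : α) (h : i < l.length) :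
    (l.set i v).getD i d = v := by
  simp [List.getD, h]

theorem getD_set_ne {α : Type} {l : List α} {i j : Nat} (v d : α) (h : j ≠ i) :
    (l.set i v).getD j d = l.getD j d := by
  simp [List.getD, List.getElem?_set_ne (by omega : i ≠ j)]

theorem getD_append_lt {α : Type} (t s : List α) (j : Nat) (d : α) (h : j < t.length) :
    (t ++ s).getD j d = t.getD j d := by
  simp [List.getD, List.getElem?_append_left h]

theorem getD_append_len {α : Type} (t : List α) (r d : α) :
    (t ++ [r]).getD t.length d = r := by
  simp [List.getD]

theorem getD_last {α : Type} (l : List α) (d : α) (N : Nat) (h : l.length = N + 1) :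
    PySem.List.pyGetD l (-1) d = l.getD N d := by
  rw [PySem.List.pyGetD_neg_ofNat l 1 d (by omega) (by omega),
      List.getD_eq_getElem l d (by omega : N < l.length)]
  congr 1
  omega

-- list sum as an indexed sum over positions
theorem sum_eq_sum_getD (l : List Int) : l.sum = ∑ i ∈ Finset.range l.length, l.getD i 0 := by
  induction l with
  | nil => simp
  | cons a tl ih =>
      rw [List.sum_cons, List.length_cons, Finset.sum_range_succ']
      simp only [List.getD_cons_succ, List.getD_cons_zero]
      rw [ih]
      ring

-- ---------- A's loops compute P ----------

-- A's column loop computes the bound-r row of partition counts from the bound-(r-1) row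
-- (the c < r branch copies, which agrees with P since P c r = P c (r-1) there).
theorem rowA_eq (N r : Nat) (hr : 1 ≤ r) (prev cur : List Int)
    (hprev : ∀ c ≤ N, prev.getD c 0 = P c (r - 1)) (hcur : cur.length = N + 1) :
    (expRowA prev cur r (N + 1)).length = N + 1 ∧
    (∀ c ≤ N, (expRowA prev cur r (N + 1)).getD c 0 = P c r) := by
  unfold expRowA
  rw [List.range_eq_range']
  suffices H : ∀ (t m : Nat), m + t = N + 1 → ∀ (w : List Int), w.length = N + 1 →
      (∀ c < m, w.getD c 0 = P c r) →
      ((List.range' m t).foldl (fun cur c => cur.set c (if c < r then prev.getD c 0 else prev.getD c 0 + cur.getD (c - r) 0)) w).length = N + 1 ∧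
      (∀ c ≤ N, ((List.range' m t).foldl (fun cur c => cur.set c (if c < r then prev.getD c 0 else prev.getD c 0 + cur.getD (c - r) 0)) w).getD c 0 = P c r) by
    exact H (N + 1) 0 (by omega) cur hcur (by omega)
  intro t
  induction t with
  | zero =>
      intro m hm w hlen hpre
      exact ⟨hlen, fun c hc => hpre c (by omega)⟩
  | succ t ih =>
      intro m hm w hlen hpre
      rw [List.range'_succ, List.foldl_cons]
      have hmlen : m < w.length := by omega
      obtain ⟨r', rfl⟩ : ∃ r', r = r' + 1 := ⟨r - 1, by omega⟩
      have hval : (w.set m (if m < r' + 1 then prev.getD m 0 else prev.getD m 0 + w.getD (m - (r' + 1)) 0)).getD m 0 = P m (r' + 1) := by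
        rw [getD_set_self _ _ hmlen]
        simp only [Nat.add_sub_cancel] at hprev
        split
        · next h => rw [hprev m (by omega), P_succ_lt h]
        · next h =>
            rw [hprev m (by omega), hpre (m - (r' + 1)) (by omega),
                ← P_succ_le (by omega : r' + 1 ≤ m)]
      refine ih (m + 1) (by omega) _ (by simp [hlen]) ?_
      intro c hc
      rcases Nat.lt_or_ge c m with h | h
      · rw [getD_set_ne _ _ (by omega)]; exact hpre c h
      · have : c = m := by omega
        subst this; exact hval

-- A's row loop, rows r0+1 .. r0+t: row lengths are preserved and each freshly set row
-- becomes the P-row for its index.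
theorem outer_inv_A (N : Nat) :
    ∀ (t r0 : Nat), 1 ≤ r0 → r0 + t ≤ N → ∀ (a : List (List Int)), a.length = N + 1 →
      (∀ j ≤ N, (a.getD j []).length = N + 1) →
      (∀ c ≤ N, (a.getD r0 []).getD c 0 = P c r0) →
      ((List.range' (r0 + 1) t).foldl
        (fun a row => if row > 1 then a.set row (expRowA (a.getD (row - 1) []) (a.getD row []) row a.length) else a) a).length = N + 1 ∧
      (∀ j ≤ N, (((List.range' (r0 + 1) t).foldl
        (fun a row => if row > 1 then a.set row (expRowA (a.getD (row - 1) []) (a.getD row []) row a.length) else a) a).getD j []).length = N + 1) ∧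
      (∀ c ≤ N, (((List.range' (r0 + 1) t).foldl
        (fun a row => if row > 1 then a.set row (expRowA (a.getD (row - 1) []) (a.getD row []) row a.length) else a) a).getD (r0 + t) []).getD c 0 = P c (r0 + t)) := by
  intro t
  induction t with
  | zero => intro r0 _ _ a hlen hall hrow; exact ⟨hlen, hall, by simpa using hrow⟩
  | succ t ih =>
      intro r0 hr0 hle a hlen hall hrow
      rw [List.range'_succ, List.foldl_cons, if_pos (by omega : r0 + 1 > 1)]
      have hnew := rowA_eq N (r0 + 1) (by omega) (a.getD r0 []) (a.getD (r0 + 1) [])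
        (fun c hc => by simpa using hrow c hc) (hall (r0 + 1) (by omega))
      have hr1len : r0 + 1 < a.length := by omega
      have key : ∀ x, x = r0 + 1 + t →
          ((List.range' (r0 + 1 + 1) t).foldl
            (fun a row => if row > 1 then a.set row (expRowA (a.getD (row - 1) []) (a.getD row []) row a.length) else a)
            (a.set (r0 + 1) (expRowA (a.getD r0 []) (a.getD (r0 + 1) []) (r0 + 1) a.length))).length = N + 1 ∧
          (∀ j ≤ N, (((List.range' (r0 + 1 + 1) t).foldl
            (fun a row => if row > 1 then a.set row (expRowA (a.getD (row - 1) []) (a.getD row []) row a.length) else a)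
            (a.set (r0 + 1) (expRowA (a.getD r0 []) (a.getD (r0 + 1) []) (r0 + 1) a.length))).getD j []).length = N + 1) ∧
          (∀ c ≤ N, (((List.range' (r0 + 1 + 1) t).foldl
            (fun a row => if row > 1 then a.set row (expRowA (a.getD (row - 1) []) (a.getD row []) row a.length) else a)
            (a.set (r0 + 1) (expRowA (a.getD r0 []) (a.getD (r0 + 1) []) (r0 + 1) a.length))).getD x []).getD c 0 = P c x) := by
        intro x hx
        subst hx
        rw [hlen]
        refine ih (r0 + 1) (by omega) (by omega) _ (by simp [hlen]) ?_ ?_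
        · intro j hj
          by_cases hje : j = r0 + 1
          · subst hje; rw [getD_set_self _ _ hr1len]; exact hnew.1
          · rw [getD_set_ne _ _ hje]; exact hall j hj
        · intro c hc
          rw [getD_set_self _ _ hr1len]
          exact hnew.2 c hc
      have := key (r0 + (t + 1)) (by omega)
      exact ⟨this.1, this.2.1, this.2.2⟩

-- the whole row loop of A (rows 0 and 1 are skipped by the `row > 1` test)
theorem foldA_eval (N : Nat) (hN : 1 ≤ N) (a : List (List Int)) (hlen : a.length = N + 1)
    (hall : ∀ j ≤ N, (a.getD j []).length = N + 1)
    (hrow1 : ∀ c ≤ N, (a.getD 1 []).getD c 0 = P c 1) :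
    ((List.range (N + 1)).foldl
      (fun a row => if row > 1 then a.set row (expRowA (a.getD (row - 1) []) (a.getD row []) row a.length) else a) a).length = N + 1 ∧
    (((List.range (N + 1)).foldl
      (fun a row => if row > 1 then a.set row (expRowA (a.getD (row - 1) []) (a.getD row []) row a.length) else a) a).getD N []).length = N + 1 ∧
    (∀ c ≤ N, (((List.range (N + 1)).foldl
      (fun a row => if row > 1 then a.set row (expRowA (a.getD (row - 1) []) (a.getD row []) row a.length) else a) a).getD N []).getD c 0 = P c N) := by
  have hsplit : List.range (N + 1) = 0 :: 1 :: List.range' 2 (N - 1) := by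
    rw [List.range_eq_range', show N + 1 = (N - 1) + 1 + 1 by omega,
        List.range'_succ, List.range'_succ]
  rw [hsplit, List.foldl_cons, List.foldl_cons]
  norm_num
  have H := outer_inv_A N (N - 1) 1 (by omega) (by omega) a hlen hall hrow1
  rw [show 1 + (N - 1) = N by omega] at H
  exact ⟨H.1, H.2.1 N le_rfl, H.2.2⟩

theorem exp_sum_eval (N : Nat) : exp_sum (N : Int) = P N N := by
  rcases Nat.eq_zero_or_pos N with h | h
  · subst h; show exp_sum 0 = P 0 0; rw [P]; decide
  · simp only [exp_sum, Int.toNat_natCast]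
    rw [show ((N : Int) + 1).toNat = N + 1 by omega, show ((N : Int) - 1).toNat = N - 1 by omega,
        PySem.List.foldl_append_singleton_eq_map]
    have hlen1 : ([(1 : Int) :: List.replicate N 0, List.replicate (N + 1) 1] ++
        (List.range (N - 1)).map (fun _ => (List.range (N + 1)).map (fun _ => (1 : Int)))).length = N + 1 := by
      simp; omega
    rw [hlen1]
    have hall : ∀ j ≤ N, (([(1 : Int) :: List.replicate N 0, List.replicate (N + 1) 1] ++
        (List.range (N - 1)).map (fun _ => (List.range (N + 1)).map (fun _ => (1 : Int)))).getD j []).length = N + 1 := by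
      intro j hj
      match j with
      | 0 => simp
      | 1 => simp
      | (j + 2) =>
          have : (([(1 : Int) :: List.replicate N 0, List.replicate (N + 1) 1] ++
              (List.range (N - 1)).map (fun _ => (List.range (N + 1)).map (fun _ => (1 : Int)))).getD (j + 2) []) =
              ((List.range (N - 1)).map (fun _ => (List.range (N + 1)).map (fun _ => (1 : Int)))).getD j [] := by
            simp [List.getD]
          rw [this, PySem.List.getD_map_range _ _ _ _ (by omega : j < N - 1)]
          simp
    have hrow1 : ∀ c ≤ N, ((([(1 : Int) :: List.replicate N 0, List.replicate (N + 1) 1] ++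
        (List.range (N - 1)).map (fun _ => (List.range (N + 1)).map (fun _ => (1 : Int)))).getD 1 []).getD c 0) = P c 1 := by
      intro c hc
      rw [P_one]
      simp [List.getD, show c < N + 1 by omega]
    have hmain := foldA_eval N h _ hlen1 hall hrow1
    rw [getD_last _ _ N hmain.1, getD_last _ _ N hmain.2.1]
    exact hmain.2.2 N le_rfl

-- ---------- B's loops compute Q ----------

-- B's inner loop fills row m with Q m k (positions outside 1..m stay 0 = Q m k there)
theorem rowB_inv (N m : Nat) (hm1 : 1 ≤ m) (hmN : m ≤ N) (t : List (List Int))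
    (ht : ∀ j < m, ∀ c ≤ N, (t.getD j []).getD c 0 = Q j c) :
    ∀ (b a : Nat), 1 ≤ a → a + b = m + 1 → ∀ (w : List Int), w.length = N + 1 →
      (∀ k < a, w.getD k 0 = Q m k) → (∀ k, a ≤ k → k ≤ N → w.getD k 0 = 0) →
      ((List.range' a b).foldl
        (fun row k => row.set k ((t.getD (m - 1) []).getD (k - 1) 0 + (t.getD (m - k) []).getD k 0)) w).length = N + 1 ∧
      (∀ k ≤ N, ((List.range' a b).foldl
        (fun row k => row.set k ((t.getD (m - 1) []).getD (k - 1) 0 + (t.getD (m - k) []).getD k 0)) w).getD k 0 = Q m k) := by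
  intro b
  induction b with
  | zero =>
      intro a ha1 hab w hlen hlo hhi
      simp only [List.range'_zero, List.foldl_nil]
      refine ⟨hlen, fun k hk => ?_⟩
      rcases Nat.lt_or_ge k a with h | h
      · exact hlo k h
      · rw [hhi k h hk, Q_gt (by omega)]
  | succ b ih =>
      intro a ha1 hab w hlen hlo hhi
      rw [List.range'_succ, List.foldl_cons]
      have halen : a < w.length := by omega
      have hval : (w.set a ((t.getD (m - 1) []).getD (a - 1) 0 + (t.getD (m - a) []).getD a 0)).getD a 0 = Q m a := by
        rw [getD_set_self _ _ halen]
        obtain ⟨m', rfl⟩ : ∃ m', m = m' + 1 := ⟨m - 1, by omega⟩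
        obtain ⟨j, rfl⟩ : ∃ j, a = j + 1 := ⟨a - 1, by omega⟩
        rw [show m' + 1 - 1 = m' by omega, show m' + 1 - (j + 1) = m' - j by omega,
            show j + 1 - 1 = j by omega]
        rw [ht m' (by omega) j (by omega), ht (m' - j) (by omega) (j + 1) (by omega)]
        exact (Q_succ_succ_le (by omega)).symm
      refine ih (a + 1) (by omega) (by omega) _ (by simp [hlen]) ?_ ?_
      · intro k hk
        rcases Nat.lt_or_ge k a with h | h
        · rw [getD_set_ne _ _ (by omega)]; exact hlo k h
        · have : k = a := by omega
          subst this; exact hval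
      · intro k h1 h2
        rw [getD_set_ne _ _ (by omega)]
        exact hhi k (by omega) h2

-- B's outer loop: each appended row has length N+1 and is the Q-row for its index
theorem tableB_inv (N : Nat) :
    ∀ (b a : Nat), 1 ≤ a → a + b = N + 1 → ∀ (t : List (List Int)), t.length = a →
      (∀ j < a, (t.getD j []).length = N + 1 ∧ ∀ c ≤ N, (t.getD j []).getD c 0 = Q j c) →
      ((List.range' a b).foldl
        (fun t m => t ++ [(List.range' 1 m).foldl
          (fun row k => row.set k ((t.getD (m - 1) []).getD (k - 1) 0 + (t.getD (m - k) []).getD k 0))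
          (List.replicate (N + 1) 0)]) t).length = N + 1 ∧
      (∀ j ≤ N, (((List.range' a b).foldl
        (fun t m => t ++ [(List.range' 1 m).foldl
          (fun row k => row.set k ((t.getD (m - 1) []).getD (k - 1) 0 + (t.getD (m - k) []).getD k 0))
          (List.replicate (N + 1) 0)]) t).getD j []).length = N + 1 ∧
        ∀ c ≤ N, (((List.range' a b).foldl
        (fun t m => t ++ [(List.range' 1 m).foldl
          (fun row k => row.set k ((t.getD (m - 1) []).getD (k - 1) 0 + (t.getD (m - k) []).getD k 0))
          (List.replicate (N + 1) 0)]) t).getD j []).getD c 0 = Q j c) := by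
  intro b
  induction b with
  | zero =>
      intro a ha1 hab t hlen ht
      simp only [List.range'_zero, List.foldl_nil]
      exact ⟨by omega, fun j hj => ht j (by omega)⟩
  | succ b ih =>
      intro a ha1 hab t hlen ht
      rw [List.range'_succ, List.foldl_cons]
      have hrow := rowB_inv N a ha1 (by omega) t (fun j hj => (ht j hj).2) a 1 (by omega)
        (by omega) (List.replicate (N + 1) 0) (by simp)
        (fun k hk => by
          have : k = 0 := by omega
          subst this
          rw [Q_zero, if_neg (by omega)]
          simp [List.getD, show 0 < N + 1 by omega])
        (fun k _ hk => by simp [List.getD, show k < N + 1 by omega])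
      refine ih (a + 1) (by omega) (by omega) _ (by simp [hlen]) ?_
      intro j hj
      rcases Nat.lt_or_ge j a with h | h
      · rw [getD_append_lt _ _ _ _ (by omega)]
        exact ht j h
      · have : j = a := by omega
        subst this
        rw [← hlen] at hrow ⊢
        rw [getD_append_len]
        exact hrow

theorem exp_sum_alt_eval (N : Nat) : exp_sum_alt (N : Int) = P N N := by
  simp only [exp_sum_alt, Int.toNat_natCast]
  rw [PySem.List.pyGetD_natCast]
  have H := tableB_inv N N 1 (by omega) (by omega) [1 :: List.replicate N 0] (by simp)
    (fun j hj => by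
      have : j = 0 := by omega
      subst this
      constructor
      · simp [List.getD]
      · intro c hc
        cases c with
        | zero => rw [Q]; rfl
        | succ c =>
            rw [Q_gt (by omega)]
            simp [List.getD, show c < N by omega])
  obtain ⟨hlenN, hrow⟩ := H.2 N le_rfl
  rw [sum_eq_sum_getD, hlenN]
  have : (∑ i ∈ Finset.range (N + 1), (((List.range' 1 N).foldl
      (fun t m => t ++ [(List.range' 1 m).foldl
        (fun row k => row.set k ((t.getD (m - 1) []).getD (k - 1) 0 + (t.getD (m - k) []).getD k 0))
        (List.replicate (N + 1) 0)]) [1 :: List.replicate N 0]).getD N []).getD i 0)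
      = ∑ i ∈ Finset.range (N + 1), Q N i := by
    refine Finset.sum_congr rfl (fun i hi => ?_)
    exact hrow i (by have := Finset.mem_range.mp hi; omega)
  rw [this]
  have hS : (∑ i ∈ Finset.range (N + 1), Q N i) = S N N := rfl
  rw [hS, S_eq_P]

-- ===== VERDICT (by name: the statement is the Claim_ definition above) =====
theorem exp_sum_spec : Claim_equal_exp_sum := by
  intro n _ hpre
  unfold Pre_exp_sum at hpre
  unfold Spec_exp_sum
  obtain ⟨N, rfl⟩ : ∃ N : Nat, n = (N : Int) := ⟨n.toNat, by omega⟩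
  rw [exp_sum_eval, exp_sum_alt_eval]
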